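-- pv_equiv track=rewrite | github.com/hirokisaito10969/AtCoder | 322/322G.py | solve
-- ===== SOURCE A (Python) =====
-- MOD = 998244353
--
-- def solve(N, X):
--     ans = 0
--
--     # a と b の値を 1 から N まで試す
--     for a in range(1, N+1):
--         for b in range(1, N+1):
--             if a == b:
--                 continue
--
--             # k >= 1 の条件から、S の長さは 1 以上
--             for k in range(1, min(10, a, b)+1):
--                 f_a = (pow(a, k, MOD) - 1) * pow(a - 1, N - k, MOD) % MOD
--                 f_b = (pow(b, k, MOD) - 1) * pow(b - 1, N - k, MOD) % MOD
--
--                 if (f_a - f_b) % MOD == X: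
--                     ans += 1
--
--     return ans % MOD
-- ===== SOURCE B (Python) =====
-- MOD = 998244353
--
-- def solve(N, X):
--     # A residue difference (f_a - f_b) % MOD always lies in [0, MOD), so no
--     # triple can match an X outside that range.
--     if X < 0 or X >= MOD:
--         return 0
--     ans = 0
--     for k in range(1, 11):
--         # values f(a, k) for every a that admits this k (k <= min(10, a))
--         vals = [(pow(a, k, MOD) - 1) * pow(a - 1, N - k, MOD) % MOD for a in range(k, N + 1)]
--         cnt = {}
--         for v in vals:
--             cnt[v] = cnt.get(v, 0) + 1
--         # ordered pairs (a, b) with f_a - f_b ≡ X: hash-count matches of f_a - X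
--         for v in vals:
--             ans += cnt.get((v - X) % MOD, 0)
--         # remove the diagonal a == b, which matches exactly when X == 0
--         if X == 0:
--             ans -= len(vals)
--     return ans % MOD
-- ===== Notes on version B (the rewrite author's own statement) =====
-- stated objective: faster
-- what changed: Replaced the O(N^2) loop over ordered pairs (a,b) with, for each k<=10, a hash-map count of the f(b,k) values so each a is matched against f(a,k)-X in O(1), subtracting the diagonal when X==0 and returning 0 immediately for X outside [0,MOD).
import Mathlib
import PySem

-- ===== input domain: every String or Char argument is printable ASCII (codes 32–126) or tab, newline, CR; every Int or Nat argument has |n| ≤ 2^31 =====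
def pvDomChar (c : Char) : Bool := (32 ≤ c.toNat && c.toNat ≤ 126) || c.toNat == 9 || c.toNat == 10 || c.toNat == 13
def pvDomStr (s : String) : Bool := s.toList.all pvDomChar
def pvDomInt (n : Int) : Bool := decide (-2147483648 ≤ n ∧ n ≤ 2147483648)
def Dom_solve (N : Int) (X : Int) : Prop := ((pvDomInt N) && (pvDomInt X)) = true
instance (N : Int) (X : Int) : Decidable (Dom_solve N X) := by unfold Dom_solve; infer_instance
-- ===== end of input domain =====

-- B replaces A's quadratic scan over ordered pairs (a,b) by, for each k ≤ 10, a
-- dict count of the f(b,k) values, matching each f(a,k)-X in one lookup.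


def pvMOD : Int := 998244353

-- ===== PORT A =====
-- exponents: inside the loops 1 ≤ k ≤ min(10, a, b) ≤ N, so k ≥ 0 and N - k ≥ 0 and
-- `.toNat` is exact (Python's pow never sees a negative exponent here).
def solve (N : Int) (X : Int) : Int :=
  let ans : Int :=
    (PySem.List.pyRange 1 (N + 1)).foldl (fun ans a =>
      (PySem.List.pyRange 1 (N + 1)).foldl (fun ans b =>
        if a = b then ans
        else
          (PySem.List.pyRange 1 (min 10 (min a b) + 1)).foldl (fun ans k =>
            let f_a := PySem.Int.mod ((PySem.Int.powMod a k.toNat pvMOD - 1) *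
                         PySem.Int.powMod (a - 1) (N - k).toNat pvMOD) pvMOD
            let f_b := PySem.Int.mod ((PySem.Int.powMod b k.toNat pvMOD - 1) *
                         PySem.Int.powMod (b - 1) (N - k).toNat pvMOD) pvMOD
            if PySem.Int.mod (f_a - f_b) pvMOD = X then ans + 1 else ans) ans) ans) 0
  PySem.Int.mod ans pvMOD

-- ===== PORT B =====
-- f(a, k) of Source B's comprehension (same modular expression as in A's body); `.toNat`
-- exact as above since a ranges over [k, N].
def pvF (N k a : Int) : Int :=
  PySem.Int.mod ((PySem.Int.powMod a k.toNat pvMOD - 1) *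
    PySem.Int.powMod (a - 1) (N - k).toNat pvMOD) pvMOD

def solve_alt (N : Int) (X : Int) : Int :=
  if X < 0 ∨ pvMOD ≤ X then 0
  else
    let ans : Int :=
      (PySem.List.pyRange 1 11).foldl (fun ans k =>
        let vals := (PySem.List.pyRange k (N + 1)).map (fun a => pvF N k a)
        let cnt := vals.foldl (fun d v => d.insert v (d.getD v 0 + 1)) PySem.Dict.empty
        let ans := vals.foldl (fun ans v =>
          ans + cnt.getD (PySem.Int.mod (v - X) pvMOD) 0) ans
        if X = 0 then ans - (vals.length : Int) else ans) 0
    PySem.Int.mod ans pvMOD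


-- ===== PRECONDITION & SPEC =====
def Spec_solve (N : Int) (X : Int) (out : Int) : Prop := out = solve_alt N X
instance (N : Int) (X : Int) (out : Int) : Decidable (Spec_solve N X out) := by unfold Spec_solve; infer_instance

-- ===== CLAIM (what is proved, stated in full; the proofs are below) =====
def Claim_equal_solve : Prop := ∀ (N : Int) (X : Int), Dom_solve N X → Spec_solve N X (solve N X)

-- ===== LEMMAS AND PROOFS =====
-- Both ports are shown equal, modulo pvMOD, to the triple sum over (a, b, k) of the
-- indicator of A's matching condition; A's side by flattening its loops, B's side by
-- turning the counter lookups back into an inner sum and subtracting the diagonal.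
-- ===== helpers =====
lemma pvM_pos : (0:Int) < pvMOD := by norm_num [pvMOD]

lemma pv_toFinset_pyRange (a b : Int) :
    (PySem.List.pyRange a b).toFinset = Finset.Icc a (b - 1) := by
  ext x
  simp only [List.mem_toFinset, PySem.List.mem_pyRange_one, Finset.mem_Icc]
  omega

lemma pv_sum_pyRange (a b : Int) (g : Int → Int) :
    ((PySem.List.pyRange a b).map g).sum = ∑ x ∈ Finset.Icc a (b - 1), g x := by
  rw [← List.sum_toFinset g (PySem.List.nodup_pyRange_one a b), pv_toFinset_pyRange]

lemma pv_countP_pyRange (a b : Int) (p : Int → Bool) :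
    ((PySem.List.pyRange a b).countP p : Int) = ∑ x ∈ Finset.Icc a (b - 1), (if p x then (1:Int) else 0) := by
  rw [← PySem.List.sum_map_ite_one_zero p (PySem.List.pyRange a b), pv_sum_pyRange]

lemma pv_length_pyRange (a b : Int) :
    ((PySem.List.pyRange a b).length : Int) = ((Finset.Icc a (b - 1)).card : Int) := by
  rw [← List.toFinset_card_of_nodup (PySem.List.nodup_pyRange_one a b), pv_toFinset_pyRange]

-- z % M = y  ↔  (z - y) % M = 0, for 0 ≤ y < M
lemma pv_emod_eq_iff {y : Int} (z : Int) (hy : 0 ≤ y) (hy' : y < pvMOD) :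
    z % pvMOD = y ↔ (z - y) % pvMOD = 0 := by
  rw [← Int.emod_eq_emod_iff_emod_sub_eq_zero]
  constructor
  · intro h; rw [h, Int.emod_eq_of_lt hy hy']
  · intro h; rw [h, Int.emod_eq_of_lt hy hy']

lemma pv_match_iff {u v X : Int} (_hu : 0 ≤ u) (_hu' : u < pvMOD) (hv : 0 ≤ v) (hv' : v < pvMOD)
    (hX : 0 ≤ X) (hX' : X < pvMOD) :
    PySem.Int.mod (u - v) pvMOD = X ↔ v = PySem.Int.mod (u - X) pvMOD := by
  rw [PySem.Int.mod_eq_emod_of_pos pvM_pos, PySem.Int.mod_eq_emod_of_pos pvM_pos, eq_comm (a := v),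
    pv_emod_eq_iff (u - v) hX hX', pv_emod_eq_iff (u - X) hv hv', sub_right_comm]

lemma pv_diag_iff {u X : Int} (hu : 0 ≤ u) (hu' : u < pvMOD) (hX : 0 ≤ X) (hX' : X < pvMOD) :
    u = PySem.Int.mod (u - X) pvMOD ↔ X = 0 := by
  rw [← pv_match_iff hu hu' hu hu' hX hX']
  rw [PySem.Int.mod_eq_emod_of_pos pvM_pos]
  simp [eq_comm]

lemma pvF_nonneg (N k a : Int) : 0 ≤ pvF N k a := PySem.Int.mod_nonneg _ pvM_pos
lemma pvF_lt (N k a : Int) : pvF N k a < pvMOD := PySem.Int.mod_lt _ pvM_pos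

-- ===== A side =====
lemma pv_kfold (N X a b s : Int) :
    (PySem.List.pyRange 1 (min 10 (min a b) + 1)).foldl (fun ans k =>
        let f_a := PySem.Int.mod ((PySem.Int.powMod a k.toNat pvMOD - 1) *
                     PySem.Int.powMod (a - 1) (N - k).toNat pvMOD) pvMOD
        let f_b := PySem.Int.mod ((PySem.Int.powMod b k.toNat pvMOD - 1) *
                     PySem.Int.powMod (b - 1) (N - k).toNat pvMOD) pvMOD
        if PySem.Int.mod (f_a - f_b) pvMOD = X then ans + 1 else ans) s
    = s + ∑ k ∈ Finset.Icc 1 (min 10 (min a b)),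
        (if PySem.Int.mod (pvF N k a - pvF N k b) pvMOD = X then (1:Int) else 0) := by
  have h : (fun (ans k : Int) =>
        let f_a := PySem.Int.mod ((PySem.Int.powMod a k.toNat pvMOD - 1) *
                     PySem.Int.powMod (a - 1) (N - k).toNat pvMOD) pvMOD
        let f_b := PySem.Int.mod ((PySem.Int.powMod b k.toNat pvMOD - 1) *
                     PySem.Int.powMod (b - 1) (N - k).toNat pvMOD) pvMOD
        if PySem.Int.mod (f_a - f_b) pvMOD = X then ans + 1 else ans)
      = (fun ans k => ans + (if PySem.Int.mod (pvF N k a - pvF N k b) pvMOD = X then (1:Int) else 0)) := by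
    funext s k
    simp only [pvF]
    split <;> simp
  rw [h, PySem.List.foldl_add, pv_sum_pyRange]
  simp

lemma pv_bfold (N X a s : Int) :
    (PySem.List.pyRange 1 (N + 1)).foldl (fun ans b => if a = b then ans
      else ans + ∑ k ∈ Finset.Icc 1 (min 10 (min a b)),
        (if PySem.Int.mod (pvF N k a - pvF N k b) pvMOD = X then (1:Int) else 0)) s
    = s + ∑ b ∈ Finset.Icc 1 N, (if a = b then 0 else ∑ k ∈ Finset.Icc 1 (min 10 (min a b)),
        (if PySem.Int.mod (pvF N k a - pvF N k b) pvMOD = X then (1:Int) else 0)) := by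
  have h : (fun (ans b : Int) => if a = b then ans
      else ans + ∑ k ∈ Finset.Icc 1 (min 10 (min a b)),
        (if PySem.Int.mod (pvF N k a - pvF N k b) pvMOD = X then (1:Int) else 0))
      = fun ans b => ans + (if a = b then 0 else ∑ k ∈ Finset.Icc 1 (min 10 (min a b)),
        (if PySem.Int.mod (pvF N k a - pvF N k b) pvMOD = X then (1:Int) else 0)) := by
    funext s b; split <;> simp
  rw [h, PySem.List.foldl_add, pv_sum_pyRange]
  simp

lemma pv_ab (N X a b : Int) :
    (if a = b then (0:Int) else ∑ k ∈ Finset.Icc 1 (min 10 (min a b)),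
        (if PySem.Int.mod (pvF N k a - pvF N k b) pvMOD = X then (1:Int) else 0))
    = ∑ k ∈ Finset.Icc (1:Int) 10,
        (if k ≤ a ∧ k ≤ b ∧ a ≠ b ∧ PySem.Int.mod (pvF N k a - pvF N k b) pvMOD = X then (1:Int) else 0) := by
  by_cases hab : a = b
  · simp [hab]
  · rw [if_neg hab]
    have h1 : ∀ k ∈ Finset.Icc 1 (min 10 (min a b)),
        (if PySem.Int.mod (pvF N k a - pvF N k b) pvMOD = X then (1:Int) else 0)
        = (if k ≤ a ∧ k ≤ b ∧ a ≠ b ∧ PySem.Int.mod (pvF N k a - pvF N k b) pvMOD = X then (1:Int) else 0) := by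
      intro k hk
      rw [Finset.mem_Icc] at hk
      have hka : k ≤ a := by omega
      have hkb : k ≤ b := by omega
      simp [hka, hkb, hab]
    rw [Finset.sum_congr rfl h1]
    refine Finset.sum_subset (Finset.Icc_subset_Icc le_rfl (by omega)) ?_
    intro k hk hnk
    rw [Finset.mem_Icc] at hk
    rw [Finset.mem_Icc] at hnk
    have : ¬ (k ≤ a ∧ k ≤ b) := by omega
    rw [if_neg (by tauto)]

lemma pv_solve_eq (N X : Int) : solve N X = PySem.Int.mod
    (∑ a ∈ Finset.Icc 1 N, ∑ b ∈ Finset.Icc 1 N, ∑ k ∈ Finset.Icc (1:Int) 10,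
      (if k ≤ a ∧ k ≤ b ∧ a ≠ b ∧ PySem.Int.mod (pvF N k a - pvF N k b) pvMOD = X then (1:Int) else 0)) pvMOD := by
  simp only [solve, pv_kfold, pv_bfold, PySem.List.foldl_add, pv_sum_pyRange,
    add_sub_cancel_right, zero_add]
  congr 1
  refine Finset.sum_congr rfl fun a _ => ?_
  refine Finset.sum_congr rfl fun b _ => ?_
  exact pv_ab N X a b

-- ===== B side =====
lemma pv_perk (N X k : Int) (hX : 0 ≤ X) (hX' : X < pvMOD) (hk : 1 ≤ k) :
    (∑ a ∈ Finset.Icc k N, ∑ b ∈ Finset.Icc k N,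
        (if pvF N k b = PySem.Int.mod (pvF N k a - X) pvMOD then (1:Int) else 0))
      - (if X = 0 then ((Finset.Icc k N).card : Int) else 0)
    = ∑ a ∈ Finset.Icc 1 N, ∑ b ∈ Finset.Icc 1 N,
        (if k ≤ a ∧ k ≤ b ∧ a ≠ b ∧ PySem.Int.mod (pvF N k a - pvF N k b) pvMOD = X then (1:Int) else 0) := by
  -- split each inner sum into off-diagonal part plus diagonal indicator
  have hsplit : ∀ a ∈ Finset.Icc k N,
      (∑ b ∈ Finset.Icc k N, (if pvF N k b = PySem.Int.mod (pvF N k a - X) pvMOD then (1:Int) else 0))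
      = (∑ b ∈ Finset.Icc k N,
          (if a ≠ b ∧ pvF N k b = PySem.Int.mod (pvF N k a - X) pvMOD then (1:Int) else 0))
        + (if X = 0 then 1 else 0) := by
    intro a ha
    have h1 : (∑ b ∈ Finset.Icc k N, (if pvF N k b = PySem.Int.mod (pvF N k a - X) pvMOD then (1:Int) else 0))
        = ∑ b ∈ Finset.Icc k N,
            ((if a ≠ b ∧ pvF N k b = PySem.Int.mod (pvF N k a - X) pvMOD then (1:Int) else 0)
             + (if a = b ∧ pvF N k b = PySem.Int.mod (pvF N k a - X) pvMOD then (1:Int) else 0)) := by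
      refine Finset.sum_congr rfl fun b _ => ?_
      by_cases h : pvF N k b = PySem.Int.mod (pvF N k a - X) pvMOD
      · rw [if_pos h]
        by_cases hab : a = b
        · rw [if_neg (by tauto), if_pos ⟨hab, h⟩]; ring
        · rw [if_pos ⟨hab, h⟩, if_neg (by tauto)]; ring
      · rw [if_neg h, if_neg (by tauto), if_neg (by tauto)]; ring
    rw [h1, Finset.sum_add_distrib]
    congr 1
    rw [Finset.sum_eq_single_of_mem a ha (fun b _ hne => by
      rw [if_neg]; rintro ⟨h1, _⟩; exact hne h1.symm)]
    have hd := pv_diag_iff (pvF_nonneg N k a) (pvF_lt N k a) hX hX'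
    by_cases h0 : X = 0
    · rw [if_pos ⟨rfl, hd.mpr h0⟩, if_pos h0]
    · rw [if_neg (by rintro ⟨-, h2⟩; exact h0 (hd.mp h2)), if_neg h0]
  rw [Finset.sum_congr rfl hsplit, Finset.sum_add_distrib, Finset.sum_const]
  have hdiag : ((Finset.Icc k N).card) • (if X = 0 then (1:Int) else 0)
      = (if X = 0 then ((Finset.Icc k N).card : Int) else 0) := by
    split <;> simp
  rw [hdiag, add_sub_cancel_right]
  -- rewrite the off-diagonal indicator into the full condition, then extend the ranges
  have hcong : ∀ a ∈ Finset.Icc k N,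
      (∑ b ∈ Finset.Icc k N,
          (if a ≠ b ∧ pvF N k b = PySem.Int.mod (pvF N k a - X) pvMOD then (1:Int) else 0))
      = ∑ b ∈ Finset.Icc 1 N,
          (if k ≤ a ∧ k ≤ b ∧ a ≠ b ∧ PySem.Int.mod (pvF N k a - pvF N k b) pvMOD = X then (1:Int) else 0) := by
    intro a ha
    rw [Finset.mem_Icc] at ha
    have h2 : ∀ b ∈ Finset.Icc k N,
        (if a ≠ b ∧ pvF N k b = PySem.Int.mod (pvF N k a - X) pvMOD then (1:Int) else 0)
        = (if k ≤ a ∧ k ≤ b ∧ a ≠ b ∧ PySem.Int.mod (pvF N k a - pvF N k b) pvMOD = X then (1:Int) else 0) := by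
      intro b hb
      rw [Finset.mem_Icc] at hb
      have hm := pv_match_iff (pvF_nonneg N k a) (pvF_lt N k a) (pvF_nonneg N k b) (pvF_lt N k b) hX hX'
      refine if_congr ?_ rfl rfl
      constructor
      · rintro ⟨h1, h2⟩; exact ⟨ha.1, hb.1, h1, hm.mpr h2⟩
      · rintro ⟨-, -, h1, h2⟩; exact ⟨h1, hm.mp h2⟩
    rw [Finset.sum_congr rfl h2]
    refine Finset.sum_subset (Finset.Icc_subset_Icc (by omega) le_rfl) ?_
    intro b hb hnb
    rw [Finset.mem_Icc] at hb; rw [Finset.mem_Icc] at hnb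
    rw [if_neg]; rintro ⟨-, hkb, -⟩; omega
  rw [Finset.sum_congr rfl hcong]
  refine Finset.sum_subset (Finset.Icc_subset_Icc (by omega) le_rfl) ?_
  intro a ha hna
  rw [Finset.mem_Icc] at ha; rw [Finset.mem_Icc] at hna
  refine Finset.sum_eq_zero fun b _ => ?_
  rw [if_neg]; rintro ⟨hka, -⟩; omega

lemma pv_count_eq (N X k a : Int) :
    ((((PySem.List.pyRange k (N + 1)).map (fun a => pvF N k a)).count
        (PySem.Int.mod (pvF N k a - X) pvMOD) : Nat) : Int)
    = ∑ b ∈ Finset.Icc k N,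
        (if pvF N k b = PySem.Int.mod (pvF N k a - X) pvMOD then (1:Int) else 0) := by
  rw [List.count_eq_countP, List.countP_map, pv_countP_pyRange]
  rw [show N + 1 - 1 = N by ring]
  refine Finset.sum_congr rfl fun b _ => ?_
  simp [Function.comp]

lemma pv_vals_sum (N X k s : Int) :
    ((PySem.List.pyRange k (N + 1)).map (fun a => pvF N k a)).foldl (fun ans v =>
        ans + (PySem.Dict.counter ((PySem.List.pyRange k (N + 1)).map (fun a => pvF N k a))).getD
          (PySem.Int.mod (v - X) pvMOD) 0) s
    = s + ∑ a ∈ Finset.Icc k N, ∑ b ∈ Finset.Icc k N,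
        (if pvF N k b = PySem.Int.mod (pvF N k a - X) pvMOD then (1:Int) else 0) := by
  rw [PySem.List.foldl_add, List.map_map]
  have h : ((PySem.List.pyRange k (N + 1)).map
      ((fun v => (PySem.Dict.counter ((PySem.List.pyRange k (N + 1)).map (fun a => pvF N k a))).getD
          (PySem.Int.mod (v - X) pvMOD) 0) ∘ fun a => pvF N k a)).sum
      = ∑ a ∈ Finset.Icc k N, ∑ b ∈ Finset.Icc k N,
        (if pvF N k b = PySem.Int.mod (pvF N k a - X) pvMOD then (1:Int) else 0) := by
    rw [pv_sum_pyRange, show N + 1 - 1 = N by ring]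
    refine Finset.sum_congr rfl fun a _ => ?_
    simp only [Function.comp]
    rw [PySem.Dict.getD_counter, pv_count_eq]
  rw [h]

lemma pv_solve_alt_eq (N X : Int) : solve_alt N X = PySem.Int.mod
    (∑ a ∈ Finset.Icc 1 N, ∑ b ∈ Finset.Icc 1 N, ∑ k ∈ Finset.Icc (1:Int) 10,
      (if k ≤ a ∧ k ≤ b ∧ a ≠ b ∧ PySem.Int.mod (pvF N k a - pvF N k b) pvMOD = X then (1:Int) else 0)) pvMOD := by
  by_cases hbad : X < 0 ∨ pvMOD ≤ X
  · rw [solve_alt, if_pos hbad]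
    have hz : (∑ a ∈ Finset.Icc 1 N, ∑ b ∈ Finset.Icc 1 N, ∑ k ∈ Finset.Icc (1:Int) 10,
        (if k ≤ a ∧ k ≤ b ∧ a ≠ b ∧ PySem.Int.mod (pvF N k a - pvF N k b) pvMOD = X then (1:Int) else 0)) = 0 := by
      refine Finset.sum_eq_zero fun a _ => Finset.sum_eq_zero fun b _ => Finset.sum_eq_zero fun c _ => ?_
      rw [if_neg]
      rintro ⟨-, -, -, h⟩
      have h1 := PySem.Int.mod_nonneg (pvF N c a - pvF N c b) pvM_pos
      have h2 := PySem.Int.mod_lt (pvF N c a - pvF N c b) pvM_pos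
      rw [h] at h1 h2
      omega
    rw [hz, PySem.Int.mod_eq_emod_of_pos pvM_pos]
    simp
  · push Not at hbad
    obtain ⟨hX, hX'⟩ := hbad
    rw [solve_alt, if_neg (by push Not; exact ⟨hX, hX'⟩)]
    simp only [PySem.Dict.foldl_insert_getD_add_one_eq_counter, pv_vals_sum, List.length_map]
    have hbody : (fun (ans k : Int) =>
        if X = 0 then
          ans + (∑ a ∈ Finset.Icc k N, ∑ b ∈ Finset.Icc k N,
            (if pvF N k b = PySem.Int.mod (pvF N k a - X) pvMOD then (1:Int) else 0))
            - ((PySem.List.pyRange k (N + 1)).length : Int)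
        else
          ans + (∑ a ∈ Finset.Icc k N, ∑ b ∈ Finset.Icc k N,
            (if pvF N k b = PySem.Int.mod (pvF N k a - X) pvMOD then (1:Int) else 0)))
      = fun ans k => ans +
          ((∑ a ∈ Finset.Icc k N, ∑ b ∈ Finset.Icc k N,
            (if pvF N k b = PySem.Int.mod (pvF N k a - X) pvMOD then (1:Int) else 0))
           - (if X = 0 then ((Finset.Icc k N).card : Int) else 0)) := by
      funext s k
      rw [pv_length_pyRange, show N + 1 - 1 = N by ring]
      split <;> ring
    rw [hbody, PySem.List.foldl_add, pv_sum_pyRange, zero_add, show (11:Int) - 1 = 10 by ring]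
    congr 1
    have hk : ∀ k ∈ Finset.Icc (1:Int) 10,
        ((∑ a ∈ Finset.Icc k N, ∑ b ∈ Finset.Icc k N,
            (if pvF N k b = PySem.Int.mod (pvF N k a - X) pvMOD then (1:Int) else 0))
          - (if X = 0 then ((Finset.Icc k N).card : Int) else 0))
        = ∑ a ∈ Finset.Icc 1 N, ∑ b ∈ Finset.Icc 1 N,
            (if k ≤ a ∧ k ≤ b ∧ a ≠ b ∧ PySem.Int.mod (pvF N k a - pvF N k b) pvMOD = X then (1:Int) else 0) := by
      intro k hkm
      rw [Finset.mem_Icc] at hkm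
      exact pv_perk N X k hX hX' hkm.1
    rw [Finset.sum_congr rfl hk, Finset.sum_comm]
    exact Finset.sum_congr rfl fun a _ => Finset.sum_comm

-- ===== VERDICT (by name: the statement is the Claim_ definition above) =====
theorem solve_spec : Claim_equal_solve := by
  intro N X _
  unfold Spec_solve
  rw [pv_solve_eq, pv_solve_alt_eq]
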